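-- pv_equiv track=rewrite | github.com/Javier-201906795/LFP_PY1_201906795 | 201906795_PY1.py | Gquitarespacios
-- ===== SOURCE A (Python) =====
-- def Gquitarespacios(Texto):
--     texttemp = ""
--     for g in Texto:
--         #A2.2 Evaluar si es un salto de Linea
--         if g == "\n" or g == "\r" or g == " ":
--             pass
--         else:
--             texttemp += g.lower()
--     return texttemp
-- ===== SOURCE B (Python) =====
-- def Gquitarespacios(Texto):
--     return Texto.replace("\n", "").replace("\r", "").replace(" ", "").lower()
-- ===== Notes on version B (the rewrite author's own statement) =====
-- stated objective: idiomatic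
-- what changed: Replaced the per-character accumulating loop with whole-string passes: three str.replace calls remove \n, \r and space, then one .lower() lowercases the result.
import Mathlib
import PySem

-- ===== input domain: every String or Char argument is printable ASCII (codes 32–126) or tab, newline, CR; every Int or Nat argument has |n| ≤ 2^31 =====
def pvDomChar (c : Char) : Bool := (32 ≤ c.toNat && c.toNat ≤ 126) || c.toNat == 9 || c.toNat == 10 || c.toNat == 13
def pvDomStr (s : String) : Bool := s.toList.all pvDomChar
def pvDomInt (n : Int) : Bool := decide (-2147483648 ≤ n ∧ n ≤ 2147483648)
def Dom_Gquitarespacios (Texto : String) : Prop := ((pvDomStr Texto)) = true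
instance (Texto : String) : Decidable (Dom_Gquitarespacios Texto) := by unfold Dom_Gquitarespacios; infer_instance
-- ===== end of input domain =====

-- B replaces A's per-character accumulating loop by three whole-string replace passes (\n, \r, " ") followed by one lower pass (idiomatic).


-- ===== PORT A =====
def Gquitarespacios (Texto : String) : String :=
  Texto.toList.foldl
    (fun texttemp g =>
      if g = '\n' ∨ g = '\r' ∨ g = ' ' then texttemp
      else texttemp ++ PySem.Str.lower (String.ofList [g]))
    ""

-- ===== PORT B =====
def Gquitarespacios_alt (Texto : String) : String :=
  PySem.Str.lower
    (PySem.Str.replace (PySem.Str.replace (PySem.Str.replace Texto "\n" "") "\r" "") " " "")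

-- ===== PRECONDITION & SPEC =====
def Spec_Gquitarespacios (Texto : String) (out : String) : Prop := out = Gquitarespacios_alt Texto
instance (Texto : String) (out : String) : Decidable (Spec_Gquitarespacios Texto out) := by unfold Spec_Gquitarespacios; infer_instance

-- ===== CLAIM (what is proved, stated in full; the proofs are below) =====
def Claim_equal_Gquitarespacios : Prop := ∀ (Texto : String), Dom_Gquitarespacios Texto → Spec_Gquitarespacios Texto (Gquitarespacios Texto)

-- ===== LEMMAS AND PROOFS =====

-- replace with a single-char pattern and empty replacement is a filter
theorem replace_go_single (c : Char) (l : List Char) (fuel : Nat) (acc : List Char)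
    (h : l.length ≤ fuel) :
    PySem.Chars.replace.go [c] [] fuel l acc = acc.reverse ++ l.filter (fun g => g ≠ c) := by
  induction l generalizing fuel acc with
  | nil => cases fuel <;> simp [PySem.Chars.replace.go]
  | cons x t ih =>
    cases fuel with
    | zero => simp at h
    | succ f =>
      rw [show PySem.Chars.replace.go [c] [] (f+1) (x::t) acc =
          if [c].isPrefixOf (x::t) then
            PySem.Chars.replace.go [c] [] f (List.drop [c].length (x::t)) ([].reverse ++ acc)
          else PySem.Chars.replace.go [c] [] f t (x :: acc) from rfl]
      have hlen : t.length ≤ f := by simpa using Nat.le_of_succ_le_succ h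
      by_cases hx : c = x
      · subst hx
        rw [if_pos (by simp [List.isPrefixOf])]
        simp only [List.length_cons, List.length_nil, List.drop_succ_cons, List.drop_zero,
          List.reverse_nil, List.nil_append]
        rw [ih f acc hlen]
        simp
      · rw [if_neg (by simp [List.isPrefixOf, hx])]
        rw [ih f (x :: acc) hlen]
        simp [Ne.symm hx]

theorem replace_single (c : Char) (l : List Char) :
    PySem.Chars.replace l [c] [] = l.filter (fun g => g ≠ c) := by
  rw [PySem.Chars.replace]
  rw [if_neg (by simp)]
  simpa using replace_go_single c l l.length [] le_rfl

theorem foldl_A (l : List Char) (acc : String) :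
    (l.foldl
      (fun texttemp g =>
        if g = '\n' ∨ g = '\r' ∨ g = ' ' then texttemp
        else texttemp ++ PySem.Str.lower (String.ofList [g]))
      acc).toList
    = acc.toList ++ ((l.filter (fun g => ¬(g = '\n' ∨ g = '\r' ∨ g = ' '))).map PySem.Chars.lowerChar) := by
  induction l generalizing acc with
  | nil => simp
  | cons x t ih =>
    simp only [List.foldl, List.filter]
    by_cases hx : x = '\n' ∨ x = '\r' ∨ x = ' '
    · rw [if_pos hx, ih]
      simp [hx]
    · rw [if_neg hx, ih]
      simp [hx, PySem.Str.lower, PySem.Chars.lower]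

theorem altB (Texto : String) : (Gquitarespacios_alt Texto).toList
    = (((Texto.toList.filter (fun g => g ≠ '\n')).filter (fun g => g ≠ '\r')).filter
        (fun g => g ≠ ' ')).map PySem.Chars.lowerChar := by
  simp only [Gquitarespacios_alt, PySem.Str.toList_lower, PySem.Str.toList_replace]
  rw [show ("\n".toList = ['\n']) from rfl, show ("\r".toList = ['\r']) from rfl,
    show (" ".toList = [' ']) from rfl, show (("" : String).toList = []) from rfl,
    replace_single, replace_single, replace_single]
  rfl

-- ===== VERDICT (by name: the statement is the Claim_ definition above) =====
theorem Gquitarespacios_spec : Claim_equal_Gquitarespacios := by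
  intro Texto _
  show Gquitarespacios Texto = Gquitarespacios_alt Texto
  have hlist : (Gquitarespacios Texto).toList = (Gquitarespacios_alt Texto).toList := by
    unfold Gquitarespacios
    rw [altB, foldl_A, List.filter_filter, List.filter_filter]
    simp only [String.toList_empty, List.nil_append]
    congr 1
    apply List.filter_congr
    intro g _
    by_cases h1 : g = '\n' <;> by_cases h2 : g = '\r' <;> by_cases h3 : g = ' ' <;>
      simp [h1, h2, h3]
  have := congrArg String.ofList hlist
  simpa using this
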